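-- pv_equiv track=rewrite | github.com/ImJiyun/Algorithm | 프로그래머스/0/120812. 최빈값 구하기/최빈값 구하기.py | solution
-- ===== SOURCE A (Python) =====
-- def solution(array):
--     counts = {}
--
--     for num in array:
--         if num not in counts:
--             counts[num] = 0
--         counts[num] += 1
--     sorted_cnts = sorted(counts.items(), key=lambda item : item[1], reverse=True)
--
--     rank_cnts = {}
--     for k, v in sorted_cnts:
--         if v not in rank_cnts:
--             rank_cnts[v] = 0
--         rank_cnts[v] += 1
--
--     return sorted_cnts[0][0] if rank_cnts[sorted_cnts[0][1]] == 1 else -1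
-- ===== SOURCE B (Python) =====
-- def solution(array):
--     counts = {}
--     for num in array:
--         counts[num] = counts.get(num, 0) + 1
--     items = iter(counts.items())
--     best_k, best_v = next(items)
--     tie = False
--     for k, v in items:
--         if v > best_v:
--             best_k, best_v, tie = k, v, False
--         elif v == best_v:
--             tie = True
--     return -1 if tie else best_k
-- ===== Notes on version B (the rewrite author's own statement) =====
-- stated objective: faster
-- what changed: B replaces A's sort of the counter items plus a second rank-counting dict by a single linear scan over the counter items that tracks the best (key,count) and a tie flag.
import Mathlib
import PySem

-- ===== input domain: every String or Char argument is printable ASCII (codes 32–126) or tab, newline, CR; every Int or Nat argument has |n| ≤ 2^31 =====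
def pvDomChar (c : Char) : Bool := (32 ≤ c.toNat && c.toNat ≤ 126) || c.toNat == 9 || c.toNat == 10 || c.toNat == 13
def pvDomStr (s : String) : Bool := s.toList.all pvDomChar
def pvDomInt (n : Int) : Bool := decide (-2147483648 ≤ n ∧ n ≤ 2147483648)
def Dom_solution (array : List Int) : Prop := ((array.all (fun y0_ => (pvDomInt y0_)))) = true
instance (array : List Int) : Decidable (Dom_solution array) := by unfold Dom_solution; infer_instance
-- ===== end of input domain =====

-- B removes the sort of the frequency-dict items and the second rank dict: one linear scan
-- over the counter items tracks the best (key, count) and a tie flag (objective: faster).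

-- ===== PORT A =====
-- A's counting loop body: 'if x not in d: d[x] = 0; d[x] += 1' (used for both of A's dicts)
def pyCountStep (d : PySem.Dict Int Int) (x : Int) : PySem.Dict Int Int :=
  let d' := if d.contains x then d else d.insert x 0
  d'.insert x (d'.getD x 0 + 1)

def solution (array : List Int) : Int :=
  let counts := array.foldl pyCountStep PySem.Dict.empty
  let sorted_cnts := PySem.List.sorted counts.items (fun it => it.2) true
  let rank_cnts := sorted_cnts.foldl (fun d kv => pyCountStep d kv.2) PySem.Dict.empty
  match sorted_cnts with
  | [] => 0  -- unreachable under Pre_solution: Python raises IndexError here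
  | p :: _ => if rank_cnts.getD p.2 0 == 1 then p.1 else -1

-- ===== PORT B =====
-- B's scan body: strictly bigger count -> new best, clear tie; equal count -> set tie
def bestStep (s : Int × Int × Bool) (p : Int × Int) : Int × Int × Bool :=
  if s.2.1 < p.2 then (p.1, p.2, false)
  else if p.2 == s.2.1 then (s.1, s.2.1, true)
  else s

def solution_alt (array : List Int) : Int :=
  let counts := array.foldl (fun d num => d.insert num (d.getD num 0 + 1)) PySem.Dict.empty
  match counts.items with
  | [] => 0  -- unreachable under Pre_solution: Python's next() raises StopIteration here
  | q :: rest =>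
    let r := rest.foldl bestStep (q.1, q.2, false)
    if r.2.2 then -1 else r.1

-- ===== PRECONDITION & SPEC =====
-- Pre_ excludes only the empty list, on which A raises IndexError (sorted_cnts[0]).
def Pre_solution (array : List Int) : Prop := array ≠ []
instance (array : List Int) : Decidable (Pre_solution array) := by unfold Pre_solution; infer_instance
def pvWitness_solution : List Int := [1, 2, 2]

def Spec_solution (array : List Int) (out : Int) : Prop := out = solution_alt array
instance (array : List Int) (out : Int) : Decidable (Spec_solution array out) := by unfold Spec_solution; infer_instance

-- ===== CLAIM (what is proved, stated in full; the proofs are below) =====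
def Claim_equal_solution : Prop := ∀ (array : List Int), Dom_solution array → Pre_solution array → Spec_solution array (solution array)

-- ===== LEMMAS AND PROOFS =====

-- A's loop body equals the plain 'd[x] = d.get(x, 0) + 1' step
theorem pyCountStep_eq : pyCountStep = fun (d : PySem.Dict Int Int) x => d.insert x (d.getD x 0 + 1) := by
  funext d x
  unfold pyCountStep
  by_cases h : d.contains x = true
  · simp [h]
  · have hc : d.contains x = false := by simpa using h
    simp [h, PySem.Dict.getD_insert_self, PySem.Dict.insert_insert_self,
      PySem.Dict.getD_of_not_contains d 0 hc]

-- closed form of B's scan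
def scanRes (ps : List (Int × Int)) (k0 v0 : Int) (t0 : Bool) : Int × Int × Bool :=
  let M := ps.foldl (fun a p => max a p.2) v0
  if v0 = M then (k0, M, t0 || ps.any (fun p => p.2 == M))
  else (((ps.find? (fun p => p.2 == M)).map (·.1)).getD k0, M,
        decide (2 ≤ ps.countP (fun p => p.2 == M)))

theorem scanRes_cons_gt (p : Int × Int) (ps : List (Int × Int)) (k0 v0 : Int) (t0 : Bool)
    (h : v0 < p.2) : scanRes (p :: ps) k0 v0 t0 = scanRes ps p.1 p.2 false := by
  have hmax : max v0 p.2 = p.2 := max_eq_right h.le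
  simp only [scanRes, List.foldl_cons, hmax]
  set M := ps.foldl (fun a q => max a q.2) p.2 with hM
  have hle : p.2 ≤ M := (PySem.List.le_foldl_max_int ps (·.2) p.2).1
  have hvM : ¬ v0 = M := ne_of_lt (lt_of_lt_of_le h hle)
  rw [if_neg hvM]
  by_cases hp : p.2 = M
  · have hpred : ((fun q : Int × Int => q.2 == M) p) = true := by simp [hp]
    rw [if_pos hp, List.find?_cons_of_pos (p := fun q : Int × Int => q.2 == M) hpred,
      List.countP_cons_of_pos (p := fun q : Int × Int => q.2 == M) hpred]
    have hany : ps.any (fun q => q.2 == M) = decide (2 ≤ ps.countP (fun q => q.2 == M) + 1) := by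
      rw [Bool.eq_iff_iff, List.any_eq_true, decide_eq_true_iff]
      constructor
      · intro ⟨x, hx, hpx⟩
        have : 0 < ps.countP (fun q => q.2 == M) := List.countP_pos_iff.mpr ⟨x, hx, hpx⟩
        omega
      · intro hge
        have : 0 < ps.countP (fun q => q.2 == M) := by omega
        exact List.countP_pos_iff.mp this
    simp [hany]
  · have hpred : ¬ ((fun q : Int × Int => q.2 == M) p) = true := by simp [hp]
    rw [if_neg hp, List.find?_cons_of_neg (p := fun q : Int × Int => q.2 == M) hpred,
      List.countP_cons_of_neg (p := fun q : Int × Int => q.2 == M) hpred]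
    have hmem : ∃ x ∈ ps, x.2 = M := by
      have hmm := PySem.List.foldl_max_mem (ps.map (·.2)) p.2
      rw [List.foldl_map] at hmm
      rcases hmm with hmm | hmm
      · exact absurd hmm.symm hp
      · obtain ⟨x, hx, hxe⟩ := List.mem_map.mp hmm
        exact ⟨x, hx, hxe⟩
    obtain ⟨x, hx, hxe⟩ := hmem
    have : (ps.find? (fun q => q.2 == M)).isSome := by
      rw [List.find?_isSome]; exact ⟨x, hx, by simp [hxe]⟩
    obtain ⟨y, hy⟩ := Option.isSome_iff_exists.mp this
    rw [hy]; simp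

theorem scanRes_cons_le (p : Int × Int) (ps : List (Int × Int)) (k0 v0 : Int) (t0 t1 : Bool)
    (h : p.2 ≤ v0) (ht : t1 = (t0 || decide (p.2 = v0))) :
    scanRes (p :: ps) k0 v0 t0 = scanRes ps k0 v0 t1 := by
  have hmax : max v0 p.2 = v0 := max_eq_left h
  simp only [scanRes, List.foldl_cons, hmax]
  set M := ps.foldl (fun a q => max a q.2) v0 with hM
  have hle : v0 ≤ M := (PySem.List.le_foldl_max_int ps (·.2) v0).1
  by_cases hv : v0 = M
  · rw [if_pos hv, if_pos hv]
    by_cases hp : p.2 = M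
    · have hpv : p.2 = v0 := hp.trans hv.symm
      have : (p :: ps).any (fun q => q.2 == M) = true := by
        simp [List.any_cons, hp]
      rw [this]
      simp [ht, hpv]
    · have : (p :: ps).any (fun q => q.2 == M) = ps.any (fun q => q.2 == M) := by
        simp [List.any_cons, hp]
      rw [this]
      have hpv : ¬ p.2 = v0 := fun hc => hp (hc.trans hv)
      simp [ht, hpv]
  · rw [if_neg hv, if_neg hv]
    have hp : ¬ ((fun q : Int × Int => q.2 == M) p) = true := by
      simp only [beq_iff_eq]
      intro hc
      exact hv (le_antisymm hle (hc ▸ h))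
    rw [List.find?_cons_of_neg (p := fun q : Int × Int => q.2 == M) hp,
      List.countP_cons_of_neg (p := fun q : Int × Int => q.2 == M) hp]

theorem scan_eq (ps : List (Int × Int)) : ∀ (k0 v0 : Int) (t0 : Bool),
    ps.foldl bestStep (k0, v0, t0) = scanRes ps k0 v0 t0 := by
  induction ps with
  | nil => intro k0 v0 t0; simp [scanRes]
  | cons p ps ih =>
    intro k0 v0 t0
    rw [List.foldl_cons]
    rcases lt_trichotomy v0 p.2 with h | h | h
    · have : bestStep (k0, v0, t0) p = (p.1, p.2, false) := by
        simp [bestStep, h]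
      rw [this, ih, scanRes_cons_gt p ps k0 v0 t0 h]
    · have : bestStep (k0, v0, t0) p = (k0, v0, true) := by
        simp [bestStep, h]
      rw [this, ih, scanRes_cons_le p ps k0 v0 t0 true h.ge (by simp [h.symm])]
    · have : bestStep (k0, v0, t0) p = (k0, v0, t0) := by
        simp [bestStep, not_lt.mpr h.le, ne_of_lt h]
      rw [this, ih, scanRes_cons_le p ps k0 v0 t0 t0 h.le (by simp [ne_of_lt h])]

-- countP = 1 makes the satisfying element unique
theorem countP_one_unique {α : Type} (l : List α) (p : α → Bool) (h : l.countP p = 1)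
    {a b : α} (ha : a ∈ l) (hpa : p a = true) (hb : b ∈ l) (hpb : p b = true) : a = b := by
  have hf : (l.filter p).length = 1 := by rw [← List.countP_eq_length_filter]; exact h
  obtain ⟨x, hx⟩ := List.length_eq_one_iff.mp hf
  have ha' : a ∈ l.filter p := List.mem_filter.mpr ⟨ha, hpa⟩
  have hb' : b ∈ l.filter p := List.mem_filter.mpr ⟨hb, hpb⟩
  rw [hx, List.mem_singleton] at ha' hb'
  rw [ha', hb']

-- the head of A's reverse-sorted list bounds every count
theorem sorted_head_max (l : List (Int × Int)) (p : Int × Int) (s' : List (Int × Int))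
    (h : PySem.List.sorted l (fun it => it.2) true = p :: s') :
    ∀ x ∈ l, x.2 ≤ p.2 := by
  have hpw := PySem.List.sorted_pairwise_rev l (fun it => it.2)
  have hperm := PySem.List.sorted_perm l (fun it => it.2) true
  rw [h] at hpw hperm
  intro x hx
  have hx' : x ∈ p :: s' := hperm.mem_iff.mpr hx
  rcases List.mem_cons.mp hx' with rfl | hx'
  · exact le_refl _
  · exact (List.pairwise_cons.mp hpw).1 x hx'

-- A's rank-count loop is a counter of the count values
theorem rank_eq (l : List (Int × Int)) :
    l.foldl (fun d kv => d.insert kv.2 (d.getD kv.2 0 + 1)) PySem.Dict.empty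
      = PySem.Dict.counter (l.map (·.2)) := by
  rw [← PySem.Dict.foldl_insert_getD_add_one_eq_counter, List.foldl_map]

-- the core equivalence, on the shared counter items
theorem core_eq (q : Int × Int) (rest : List (Int × Int)) (p : Int × Int) (s' : List (Int × Int))
    (hps : PySem.List.sorted (q :: rest) (fun it => it.2) true = p :: s') :
    (if ((List.count p.2 ((p :: s').map (·.2)) : Int) == 1) then p.1 else -1)
      = (if (scanRes rest q.1 q.2 false).2.2 then -1 else (scanRes rest q.1 q.2 false).1) := by
  have hperm : (p :: s').Perm (q :: rest) := hps ▸ PySem.List.sorted_perm (q :: rest) (fun it => it.2) true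
  set M := rest.foldl (fun a x => max a x.2) q.2 with hMdef
  have hub : ∀ x ∈ q :: rest, x.2 ≤ M := by
    intro x hx
    rcases List.mem_cons.mp hx with he | hx
    · rw [he]; exact (PySem.List.le_foldl_max_int rest (·.2) q.2).1
    · exact (PySem.List.le_foldl_max_int rest (·.2) q.2).2 x hx
  have hex : ∃ x ∈ q :: rest, x.2 = M := by
    have hmm := PySem.List.foldl_max_mem (rest.map (·.2)) q.2
    rw [List.foldl_map] at hmm
    rcases hmm with hmm | hmm
    · exact ⟨q, List.mem_cons_self, hmm.symm⟩
    · obtain ⟨x, hx, hxe⟩ := List.mem_map.mp hmm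
      exact ⟨x, List.mem_cons_of_mem _ hx, hxe⟩
  have hhead := sorted_head_max (q :: rest) p s' hps
  have hpmem : p ∈ q :: rest := hperm.subset List.mem_cons_self
  have hpM : p.2 = M := by
    obtain ⟨x, hx, hxe⟩ := hex
    exact le_antisymm (hub p hpmem) (hxe ▸ hhead x hx)
  have hpp : ((fun x : Int × Int => x.2 == M) p) = true := by simp [hpM]
  have hcnt : List.count p.2 ((p :: s').map (·.2))
      = List.countP (fun x : Int × Int => x.2 == M) (q :: rest) := by
    rw [List.count_eq_countP, List.countP_map]
    have hfun : ((fun x => x == p.2) ∘ (fun x : Int × Int => x.2))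
        = (fun x : Int × Int => x.2 == M) := by
      funext x; simp [Function.comp, hpM]
    rw [hfun, List.Perm.countP_eq _ hperm]
  rw [hcnt]
  set c := List.countP (fun x : Int × Int => x.2 == M) (q :: rest) with hc
  by_cases hq : q.2 = M
  · have hpq : ((fun x : Int × Int => x.2 == M) q) = true := by simp [hq]
    have hcc : c = List.countP (fun x : Int × Int => x.2 == M) rest + 1 := by
      rw [hc, List.countP_cons_of_pos (p := fun x : Int × Int => x.2 == M) hpq]
    simp only [scanRes, if_pos hq, ← hMdef]
    by_cases h1 : List.countP (fun x : Int × Int => x.2 == M) rest = 0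
    · have hany : rest.any (fun x => x.2 == M) = false := by
        rw [List.any_eq_false]
        exact List.countP_eq_zero.mp h1
      have hc1 : c = 1 := by omega
      have hpeqq : p = q := countP_one_unique (q :: rest) _ (hc ▸ hc1) hpmem hpp
        List.mem_cons_self hpq
      simp [hany, hc1, hpeqq]
    · have hany : rest.any (fun x => x.2 == M) = true := by
        rw [List.any_eq_true]
        exact List.countP_pos_iff.mp (by omega)
      have hcne : ¬ ((c : Int) == 1) = true := by
        simp only [beq_iff_eq]
        intro hcast
        have : c = 1 := by exact_mod_cast hcast
        omega
      simp [hany, hcne]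
  · have hpq : ¬ ((fun x : Int × Int => x.2 == M) q) = true := by simp [hq]
    have hcc : c = List.countP (fun x : Int × Int => x.2 == M) rest := by
      rw [hc, List.countP_cons_of_neg (p := fun x : Int × Int => x.2 == M) hpq]
    have hcpos : 0 < c := List.countP_pos_iff.mpr ⟨p, hpmem, hpp⟩
    simp only [scanRes, if_neg hq, ← hMdef]
    by_cases h1 : c = 1
    · have hdec : ¬ (2 ≤ List.countP (fun x : Int × Int => x.2 == M) rest) := by omega
      have hfind : ∃ y, List.find? (fun x : Int × Int => x.2 == M) rest = some y := by
        apply Option.isSome_iff_exists.mp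
        rw [List.find?_isSome]
        obtain ⟨x, hx, hxe⟩ := hex
        rcases List.mem_cons.mp hx with rfl | hx'
        · exact absurd hxe hq
        · exact ⟨x, hx', by simp [hxe]⟩
      obtain ⟨y, hy⟩ := hfind
      have hyp : p = y := countP_one_unique (q :: rest) _ (hc ▸ h1) hpmem hpp
        (List.mem_cons_of_mem _ (List.mem_of_find?_eq_some hy)) (List.find?_some hy)
      simp [hdec, hy, h1, ← hyp]
    · have hdec : 2 ≤ List.countP (fun x : Int × Int => x.2 == M) rest := by omega
      have hcne : ¬ ((c : Int) == 1) = true := by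
        simp only [beq_iff_eq]
        intro hcast
        exact h1 (by exact_mod_cast hcast)
      simp [hdec, hcne]

-- ===== VERDICT (by name: the statement is the Claim_ definition above) =====
theorem solution_spec : Claim_equal_solution := by
  unfold Claim_equal_solution
  intro array _ hne
  unfold Spec_solution solution solution_alt
  simp only [pyCountStep_eq, PySem.Dict.foldl_insert_getD_add_one_eq_counter, rank_eq]
  have hitems : ∃ q rest, (PySem.Dict.counter array).items = q :: rest := by
    rw [PySem.Dict.items_counter]
    cases hS : PySem.Set.ofList array with
    | nil =>
      exfalso
      cases array with
      | nil => exact hne rfl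
      | cons a t =>
        have ha : a ∈ PySem.Set.ofList (a :: t) :=
          (PySem.Set.mem_ofList (a :: t) a).mpr List.mem_cons_self
        rw [hS] at ha
        cases ha
    | cons b S' => exact ⟨_, _, List.map_cons ..⟩
  obtain ⟨q, rest, hqr⟩ := hitems
  rw [hqr]
  have hs : ∃ p s', PySem.List.sorted (q :: rest) (fun it => it.2) true = p :: s' := by
    cases hh : PySem.List.sorted (q :: rest) (fun it => it.2) true with
    | nil => exact absurd ((PySem.List.sorted_eq_nil_iff _ _ _).mp hh) (by simp)
    | cons p s' => exact ⟨p, s', rfl⟩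
  obtain ⟨p, s', hps⟩ := hs
  rw [hps]
  simp only [PySem.Dict.getD_counter, scan_eq]
  exact core_eq q rest p s' hps
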